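-- pv_equiv track=rewrite | github.com/AhmadSaeedZaidi/viralvelocity | atlas/src/atlas/utils.py | validate_channel_id
-- ===== SOURCE A (Python) =====
-- def validate_channel_id(channel_id: str) -> bool:
--     """
--     Validate YouTube channel ID format.
--
--     Args:
--         channel_id: YouTube channel ID to validate
--
--     Returns:
--         True if valid, False otherwise
--     """
--     if not channel_id or not isinstance(channel_id, str):
--         return False
--
--     if not channel_id.startswith("UC"):
--         return False
--
--     if len(channel_id) != 24:
--         return False
--
--     allowed_chars = set("ABCDEFGHIJKLMNOPQRSTUVWXYZabcdefghijklmnopqrstuvwxyz0123456789-_")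
--     return all(c in allowed_chars for c in channel_id)
-- ===== SOURCE B (Python) =====
-- def validate_channel_id(channel_id: str) -> bool:
--     if not isinstance(channel_id, str):
--         return False
--     i = 0
--     for c in channel_id:
--         if i == 0:
--             ok = c == "U"
--         elif i == 1:
--             ok = c == "C"
--         else:
--             ok = ("A" <= c <= "Z" or "a" <= c <= "z"
--                   or "0" <= c <= "9" or c == "-" or c == "_")
--         if not ok:
--             return False
--         i += 1
--     return i == 24
-- ===== Notes on version B (the rewrite author's own statement) =====
-- stated objective: alternative
-- what changed: Replaces A's four staged checks (emptiness guard, startswith, length test, then an all() set-membership scan) by a single position-indexed scan that validates each character by its position (U at 0, C at 1, code-range class afterwards) and the exact length 24 when the string is exhausted, with no character set at all.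
import Mathlib
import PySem

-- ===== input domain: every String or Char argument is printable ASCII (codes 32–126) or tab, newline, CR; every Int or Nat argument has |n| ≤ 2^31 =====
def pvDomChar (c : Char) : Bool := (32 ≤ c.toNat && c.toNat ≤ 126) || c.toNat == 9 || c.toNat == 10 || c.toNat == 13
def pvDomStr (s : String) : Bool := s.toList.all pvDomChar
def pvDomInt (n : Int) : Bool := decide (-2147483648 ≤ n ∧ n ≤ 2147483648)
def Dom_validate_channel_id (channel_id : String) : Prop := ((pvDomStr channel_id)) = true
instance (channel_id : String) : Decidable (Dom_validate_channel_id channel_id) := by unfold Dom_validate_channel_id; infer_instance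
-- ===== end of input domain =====

-- B replaces A's staged checks (emptiness, startswith, length, set-membership all() scan)
-- by one position-indexed single-pass scan that validates prefix, character class (as code
-- ranges) and exact length in a single pass (alternative decomposition, same cost).

set_option maxRecDepth 40000

-- ===== PORT A =====
-- allowed_chars = set("…") built inside A
def vciAllowedA : PySem.Set Char :=
  PySem.Set.ofList "ABCDEFGHIJKLMNOPQRSTUVWXYZabcdefghijklmnopqrstuvwxyz0123456789-_".toList

def validate_channel_id (channel_id : String) : Bool :=
  if channel_id.toList = [] then false            -- 'not channel_id' (isinstance is type-level here)
  else if !(PySem.Str.startswith channel_id "UC") then false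
  else if PySem.Str.len channel_id ≠ 24 then false
  else channel_id.toList.all (fun c => PySem.Set.contains vciAllowedA c)

-- ===== PORT B =====
-- the character-class test of B's i ≥ 2 branch ("A"<=c<="Z" or … or c == "_")
def vciClassOk (c : Char) : Bool :=
  ('A' ≤ c && c ≤ 'Z') || ('a' ≤ c && c ≤ 'z') || ('0' ≤ c && c ≤ '9') || c == '-' || c == '_'

-- the per-position check of B's loop
def vciGood (i : Nat) (c : Char) : Bool :=
  if i == 0 then c == 'U'
  else if i == 1 then c == 'C'
  else vciClassOk c

-- the per-character loop of B, carrying the index i (early false = early return)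
def vciScan : List Char → Nat → Bool
  | [], i => i == 24
  | c :: rest, i => vciGood i c && vciScan rest (i + 1)

def validate_channel_id_alt (channel_id : String) : Bool :=
  vciScan channel_id.toList 0

-- ===== PRECONDITION & SPEC =====
def Spec_validate_channel_id (channel_id : String) (out : Bool) : Prop := out = validate_channel_id_alt channel_id
instance (channel_id : String) (out : Bool) : Decidable (Spec_validate_channel_id channel_id out) := by unfold Spec_validate_channel_id; infer_instance

-- ===== CLAIM (what is proved, stated in full; the proofs are below) =====
def Claim_equal_validate_channel_id : Prop := ∀ (channel_id : String), Dom_validate_channel_id channel_id → Spec_validate_channel_id channel_id (validate_channel_id channel_id)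

-- ===== LEMMAS AND PROOFS =====

-- on the 127 characters with code ≤ 126 the range test agrees with A's set
theorem vciTable : ∀ n : Nat, n < 127 →
    vciClassOk (Char.ofNat n) = PySem.Set.contains vciAllowedA (Char.ofNat n) := by decide

theorem vciClass_eq_contains (c : Char) (hc : pvDomChar c = true) :
    vciClassOk c = PySem.Set.contains vciAllowedA c := by
  have h126 : c.toNat < 127 := by
    simp [pvDomChar] at hc
    omega
  have := vciTable c.toNat h126
  rwa [Char.ofNat_toNat] at this

theorem vciAll_eq (l : List Char) (hd : l.all pvDomChar = true) :
    l.all vciClassOk = l.all (fun c => PySem.Set.contains vciAllowedA c) := by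
  induction l with
  | nil => rfl
  | cons c rest ih =>
    simp only [List.all_cons] at hd ⊢
    rcases Bool.and_eq_true_iff.mp hd with ⟨hc, hrest⟩
    rw [vciClass_eq_contains c hc, ih hrest]

theorem vciScan_ge2 (l : List Char) (i : Nat) (h : 2 ≤ i) :
    vciScan l i = (decide (i + l.length = 24) && l.all vciClassOk) := by
  induction l generalizing i with
  | nil =>
    rw [vciScan]
    apply Bool.eq_iff_iff.mpr
    simp
  | cons c rest ih =>
    have hg : vciGood i c = vciClassOk c := by
      unfold vciGood
      rw [if_neg (by simp; omega), if_neg (by simp; omega)]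
    rw [vciScan, hg, ih (i + 1) (by omega)]
    have hlen : decide (i + 1 + rest.length = 24) = decide (i + (c :: rest).length = 24) := by
      apply decide_eq_decide.mpr
      simp; omega
    rw [hlen, List.all_cons, Bool.and_left_comm]

theorem vci_eq_list (l : List Char) (hd : l.all pvDomChar = true) :
    (if l = [] then false
     else if !(PySem.Chars.startswith l "UC".toList) then false
     else if (l.length : Int) ≠ 24 then false
     else l.all (fun c => PySem.Set.contains vciAllowedA c))
    = vciScan l 0 := by
  rw [show "UC".toList = ['U', 'C'] from by decide]
  match l with
  | [] => simp [vciScan]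
  | [c] =>
    have hp : ¬ (['U', 'C'] <+: [c]) := by
      intro h
      have := h.length_le
      simp at this
    rw [if_neg (by simp),
        Bool.eq_false_iff.mpr (fun h => hp ((PySem.Chars.startswith_iff _ _).mp h))]
    simp [vciScan, vciGood]
  | c0 :: c1 :: rest =>
    have hsw : PySem.Chars.startswith (c0 :: c1 :: rest) ['U', 'C']
        = ((c0 == 'U') && (c1 == 'C')) := by
      apply Bool.eq_iff_iff.mpr
      rw [PySem.Chars.startswith_iff]
      constructor
      · intro h
        have h1 := List.cons_prefix_cons.mp h
        have h2 := List.cons_prefix_cons.mp h1.2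
        simp [h1.1.symm, h2.1.symm]
      · intro h
        simp only [Bool.and_eq_true, beq_iff_eq] at h
        exact List.cons_prefix_cons.mpr ⟨h.1.symm,
          List.cons_prefix_cons.mpr ⟨h.2.symm, List.nil_prefix⟩⟩
    have hall : (c0 :: c1 :: rest).all pvDomChar = true := hd
    simp only [List.all_cons, Bool.and_eq_true] at hall
    rw [if_neg (by simp), hsw]
    have hrhs : vciScan (c0 :: c1 :: rest) 0
        = ((c0 == 'U') && ((c1 == 'C') && (decide (2 + rest.length = 24) && rest.all vciClassOk))) := by
      rw [vciScan, vciScan, vciScan_ge2 rest 2 (le_refl 2)]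
      rfl
    rw [hrhs]
    by_cases hU : c0 = 'U'
    · by_cases hC : c1 = 'C'
      · subst hU; subst hC
        by_cases hL : rest.length = 22
        · have h24 : ¬ (((('U' :: 'C' :: rest).length : Nat) : Int) ≠ 24) := by
            simp [hL]
          rw [if_neg (by simp), if_neg h24]
          simp only [List.all_cons]
          rw [show PySem.Set.contains vciAllowedA 'U' = true from by decide,
              show PySem.Set.contains vciAllowedA 'C' = true from by decide,
              ← vciAll_eq rest hall.2.2]
          simp [hL]
        · have h24 : (((('U' :: 'C' :: rest).length : Nat) : Int) ≠ 24) := by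
            simp; omega
          rw [if_neg (by simp), if_pos h24]
          have : decide (2 + rest.length = 24) = false := by
            simp; omega
          simp [this]
      · rw [if_pos (by simp [hC])]
        simp [hC]
    · rw [if_pos (by simp [hU])]
      simp [hU]

theorem vci_eq (s : String) (hd : pvDomStr s = true) :
    validate_channel_id s = validate_channel_id_alt s := by
  unfold validate_channel_id validate_channel_id_alt
  rw [show PySem.Str.startswith s "UC" = PySem.Chars.startswith s.toList "UC".toList from
        PySem.Str.startswith_eq s "UC",
      PySem.Str.len_eq]
  exact vci_eq_list s.toList hd

-- ===== VERDICT (by name: the statement is the Claim_ definition above) =====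
theorem validate_channel_id_spec : Claim_equal_validate_channel_id := by
  intro s hd
  unfold Spec_validate_channel_id
  exact vci_eq s hd
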